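-- pv_equiv track=rewrite | github.com/Marciland/advent-of-code | 2023_python/solution/day9.py | predict_previous
-- ===== SOURCE A (Python) =====
-- def only_zero(lis: list) -> bool:
--     '''if all entries in lis are 0 return True'''
--     return lis.count(0) == len(lis)
--
-- def generate_differences(history: list[int]) -> list[list[int]]:
--     '''
--     create a pyramid (list of lists) that contains the differences
--     0   3   6   9  12  15
--       3   3   3   3   3
--         0   0   0   0
--     '''
--     pyramid = []
--     pyramid.append(history)
--     while True:
--         # if all values at the last index are 0
--         if only_zero(pyramid[-1]):
--             break
--         differences = []
--         for index in range(0, len(pyramid[-1])-1, 1):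
--             differences.append(pyramid[-1][index+1] - pyramid[-1][index])
--         pyramid.append(differences)
--     return pyramid
--
-- def predict_previous(history: list[int]) -> int:
--     '''predict new first entry : result = value_below - value above'''
--     differences = generate_differences(history)
--     differences.reverse()
--     for index in range(1, len(differences)-1, 1):
--         x = differences[index][0]
--         y = differences[index+1][0]
--         differences[index+1].insert(0, y-x)
--     # based on the first value of the last list
--     return differences[-1][0]
-- ===== SOURCE B (Python) =====
-- def predict_previous(history):
--     """Closed form: backward extrapolation p(-1) = sum_i (-1)^i * C(n, i+1) * a_i,
--     with the binomial coefficient maintained incrementally (exact integer division)."""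
--     n = len(history)
--     total = 0
--     coeff = n  # C(n, 1)
--     for i, value in enumerate(history):
--         total += (coeff if i % 2 == 0 else -coeff) * value
--         coeff = coeff * (n - i - 1) // (i + 2)  # C(n, i+2)
--     return total
-- ===== Notes on version B (the rewrite author's own statement) =====
-- stated objective: faster
-- what changed: Replaces the explicit difference pyramid (build all rows, reverse, back-substitute with inserts) by the closed form p(-1) = sum_i (-1)^i * C(n, i+1) * a_i, computing the binomial coefficient incrementally in one pass; B does not mutate its argument (A prepends the result to the input list in place).
-- outside the precondition, e.g. on predict_previous([]): A raises IndexError, B returns 0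
import Mathlib
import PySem

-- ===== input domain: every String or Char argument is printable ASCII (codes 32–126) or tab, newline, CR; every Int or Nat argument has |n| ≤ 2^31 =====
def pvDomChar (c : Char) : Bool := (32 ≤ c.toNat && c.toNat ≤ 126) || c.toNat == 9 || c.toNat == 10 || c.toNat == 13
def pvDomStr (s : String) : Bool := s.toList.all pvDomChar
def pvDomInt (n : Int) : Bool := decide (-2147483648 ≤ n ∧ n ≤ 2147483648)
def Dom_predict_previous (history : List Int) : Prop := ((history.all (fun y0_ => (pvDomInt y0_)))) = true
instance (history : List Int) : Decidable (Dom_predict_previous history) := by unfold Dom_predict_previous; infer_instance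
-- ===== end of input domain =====

-- B replaces A's O(n^2) difference pyramid by the O(n) closed form sum_i (-1)^i*C(n,i+1)*a_i (objective: faster).
-- Python A also mutates its argument in place (the result is prepended to it); B does not — the claim is about the return value.

-- ===== PORT A =====
def only_zero (lis : List Int) : Bool :=
  PySem.List.count lis 0 == lis.length

def gen_diff_row (row : List Int) : List Int :=
  (PySem.List.pyRange 0 ((row.length : Int) - 1) 1).foldl
    (fun differences index =>
      differences ++ [PySem.List.pyGetD row (index + 1) 0 - PySem.List.pyGetD row index 0])
    []

-- the 'while True' loop of generate_differences; the fuel only makes the recursion total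
-- (each appended row is one shorter, and the empty row breaks the loop, so length+1 steps always suffice)
def gd_loop : Nat → List (List Int) → List (List Int)
  | 0, pyramid => pyramid
  | fuel+1, pyramid =>
    if only_zero (PySem.List.pyGetD pyramid (-1) []) then pyramid
    else gd_loop fuel (pyramid ++ [gen_diff_row (PySem.List.pyGetD pyramid (-1) [])])

def generate_differences (history : List Int) : List (List Int) :=
  gd_loop (history.length + 1) [history]

-- one step of predict_previous' for-loop (x, y, then differences[index+1].insert(0, y-x))
def pp_step (ds : List (List Int)) (index : Int) : List (List Int) :=
  let x := PySem.List.pyGetD (PySem.List.pyGetD ds index []) 0 0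
  let y := PySem.List.pyGetD (PySem.List.pyGetD ds (index + 1) []) 0 0
  PySem.List.pySetD ds (index + 1) (PySem.List.insert (PySem.List.pyGetD ds (index + 1) []) 0 (y - x))

def predict_previous (history : List Int) : Int :=
  let differences := (generate_differences history).reverse
  let final := (PySem.List.pyRange 1 ((differences.length : Int) - 1) 1).foldl pp_step differences
  PySem.List.pyGetD (PySem.List.pyGetD final (-1) []) 0 0

-- ===== PORT B =====
def predict_previous_alt (history : List Int) : Int :=
  let n : Int := history.length
  let p := (PySem.List.enumerate history 0).foldl
    (fun (st : Int × Int) iv =>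
      (st.1 + (if PySem.Int.mod iv.1 2 == 0 then st.2 else -st.2) * iv.2,
       PySem.Int.floordiv (st.2 * (n - iv.1 - 1)) (iv.1 + 2)))
    (0, n)
  p.1

-- ===== PRECONDITION & SPEC =====
-- Python A raises IndexError on the empty list (differences[-1][0]); that is the only raising input.
def Pre_predict_previous (history : List Int) : Prop := history ≠ []
instance (history : List Int) : Decidable (Pre_predict_previous history) := by unfold Pre_predict_previous; infer_instance
def pvWitness_predict_previous : List Int := [0, 3, 6, 9, 12, 15]

def Spec_predict_previous (history : List Int) (out : Int) : Prop := out = predict_previous_alt history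
instance (history : List Int) (out : Int) : Decidable (Spec_predict_previous history out) := by unfold Spec_predict_previous; infer_instance

-- ===== CLAIM (what is proved, stated in full; the proofs are below) =====
def Claim_equal_predict_previous : Prop := ∀ (history : List Int), Dom_predict_previous history → Pre_predict_previous history → Spec_predict_previous history (predict_previous history)

-- ===== LEMMAS AND PROOFS =====

-- proof-side helpers
def diffB (h : List Int) : List Int := (h.zip h.tail).map (fun p => p.2 - p.1)

lemma length_diffB (h : List Int) : (diffB h).length = h.length - 1 := by
  simp [diffB]

def pvR (h : List Int) : Int :=
  if h.all (fun x => x == 0) then 0 else h.getD 0 0 - pvR (diffB h)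
termination_by h.length
decreasing_by
  rename_i hz
  have hne : h ≠ [] := by rintro rfl; simp at hz
  have := length_diffB h
  have : 0 < h.length := List.length_pos_iff.mpr hne
  omega

def chainF : Nat → List Int → List (List Int)
  | 0, _ => []
  | f+1, r =>
    if only_zero r then []
    else gen_diff_row r :: chainF f (gen_diff_row r)

def step' (w : Int) (row : List Int) : Int := row.getD 0 0 - w

lemma only_zero_iff (r : List Int) : only_zero r = r.all (fun x => x == 0) := by
  rw [only_zero, PySem.List.count_eq, Bool.eq_iff_iff, beq_iff_eq, List.all_eq_true,
    List.count_eq_length]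
  simp only [beq_iff_eq]
  constructor
  · intro h x hx; exact (h x hx).symm
  · intro h x hx; exact (h x hx).symm

lemma getD_diffB (h : List Int) (i : Nat) (hi : i + 1 < h.length) :
    (diffB h).getD i 0 = h.getD (i+1) 0 - h.getD i 0 := by
  have hlen : i < (h.zip h.tail).length := by simp; omega
  rw [diffB, List.getD_eq_getElem?_getD, List.getElem?_map]
  rw [List.getElem?_eq_getElem hlen]
  simp only [Option.map_some, Option.getD_some, List.getElem_zip]
  rw [List.getElem_tail]
  rw [List.getD_eq_getElem?_getD, List.getD_eq_getElem?_getD,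
      List.getElem?_eq_getElem (by omega), List.getElem?_eq_getElem (by omega)]
  simp

lemma gen_diff_row_eq (r : List Int) : gen_diff_row r = diffB r := by
  rw [gen_diff_row, PySem.List.foldl_append_singleton_eq_map, List.nil_append]
  apply List.ext_getElem
  · simp [PySem.List.length_pyRange_one, diffB]
  · intro j h1 h2
    simp only [List.getElem_map, PySem.List.getElem_pyRange_one, diffB, List.getElem_zip,
      List.getElem_tail]
    have hj : j < r.length - 1 := by
      simpa [PySem.List.length_pyRange_one] using h1
    have e1 : (0 : Int) + j + 1 = ((j+1 : Nat) : Int) := by omega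
    have e0 : (0 : Int) + j = ((j : Nat) : Int) := by omega
    rw [e1, e0, PySem.List.pyGetD_natCast, PySem.List.pyGetD_natCast]
    rw [List.getD_eq_getElem?_getD, List.getD_eq_getElem?_getD,
      List.getElem?_eq_getElem (by omega), List.getElem?_eq_getElem (by omega)]
    simp

lemma gd_loop_eq (f : Nat) : ∀ (p : List (List Int)), p ≠ [] →
    gd_loop f p = p ++ chainF f (p.getLast?.getD []) := by
  induction f with
  | zero => intro p hp; simp [gd_loop, chainF]
  | succ f ih =>
    intro p hp
    have hg : p.getLast?.getD [] = p.getLast hp := by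
      simp [List.getLast?_eq_some_getLast hp]
    rw [gd_loop, PySem.List.pyGetD_neg_one p [] hp, hg, chainF]
    by_cases hz : only_zero (p.getLast hp) = true
    · simp [hz]
    · simp only [Bool.not_eq_true] at hz
      rw [hz]
      simp only [Bool.false_eq_true, if_false]
      rw [ih _ (by simp)]
      have h2 : ((p ++ [gen_diff_row (p.getLast hp)]).getLast?.getD []) =
          gen_diff_row (p.getLast hp) := by simp
      rw [h2, List.append_assoc]
      rfl

lemma loop_inv (d : List (List Int)) :
    ∀ (t k : Nat) (ds : List (List Int)) (v : Int),
    t = d.length - 1 - k →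
    ds.length = d.length → k < d.length →
    (ds.getD k []).getD 0 0 = v →
    (∀ j : Nat, k < j → j < d.length → ds.getD j [] = d.getD j []) →
    ((((PySem.List.pyRange (k : Int) ((d.length : Int) - 1) 1).foldl pp_step ds).getLast?.getD []).getD 0 0)
      = (d.drop (k+1)).foldl step' v := by
  intro t
  induction t with
  | zero =>
    intro k ds v ht hlen hk hv hsuff
    have hke : k = d.length - 1 := by omega
    rw [PySem.List.pyRange_one_eq_nil (by omega)]
    simp only [List.foldl_nil]
    rw [List.drop_eq_nil_of_le (by omega), List.foldl_nil]
    have hds : ds ≠ [] := by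
      intro e; rw [e] at hlen; simp at hlen; omega
    have : ds.getLast?.getD [] = ds.getD (ds.length - 1) [] := by
      rw [List.getLast?_eq_some_getLast hds, Option.getD_some, List.getLast_eq_getElem,
        List.getD_eq_getElem?_getD, List.getElem?_eq_getElem (by omega)]
      simp
    rw [this, hlen, ← hke, hv]
  | succ t ih =>
    intro k ds v ht hlen hk hv hsuff
    have hkl : k < d.length - 1 := by omega
    rw [PySem.List.pyRange_one_cons (by omega : (k:Int) < (d.length : Int) - 1)]
    rw [List.foldl_cons]
    -- evaluate pp_step ds k
    have hx : PySem.List.pyGetD (PySem.List.pyGetD ds (k : Int) []) 0 0 = v := by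
      rw [PySem.List.pyGetD_natCast, PySem.List.pyGetD_zero, hv]
    have ek1 : (k : Int) + 1 = ((k+1 : Nat) : Int) := by omega
    have hds1 : ds.getD (k+1) [] = d.getD (k+1) [] := hsuff (k+1) (by omega) (by omega)
    have hy : PySem.List.pyGetD (PySem.List.pyGetD ds ((k : Int) + 1) []) 0 0
        = (d.getD (k+1) []).getD 0 0 := by
      rw [ek1, PySem.List.pyGetD_natCast, PySem.List.pyGetD_zero, hds1]
    have hstep : pp_step ds (k : Int)
        = ds.set (k+1) (((d.getD (k+1) []).getD 0 0 - v) :: d.getD (k+1) []) := by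
      rw [pp_step]
      simp only [ek1, PySem.List.pyGetD_natCast, PySem.List.pySetD_natCast,
        PySem.List.insert_zero, PySem.List.pyGetD_zero, hds1, hv]
    rw [hstep, ek1]
    have ih' := ih (k+1) (ds.set (k+1) (((d.getD (k+1) []).getD 0 0 - v) :: d.getD (k+1) []))
      ((d.getD (k+1) []).getD 0 0 - v) (by omega) (by simp [hlen]) (by omega) ?_ ?_
    · rw [ih']
      have : d.drop (k+1) = d.getD (k+1) [] :: d.drop (k+2) := by
        rw [List.getD_eq_getElem?_getD, List.getElem?_eq_getElem (by omega)]
        simp [(List.drop_eq_getElem_cons (by omega : k+1 < d.length)).symm]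
      rw [this, List.foldl_cons]
      rfl
    · generalize d.getD (k+1) [] = X
      simp only [List.getD_eq_getElem?_getD]
      rw [List.getElem?_set_self (by omega : k+1 < ds.length)]
      simp
    · intro j hj1 hj2
      rw [List.getD_eq_getElem?_getD, List.getElem?_set_ne (by omega : k+1 ≠ j),
        ← List.getD_eq_getElem?_getD]
      exact hsuff j (by omega) hj2

lemma all_zero_getD (r : List Int) (h : r.all (fun x => x == 0) = true) : r.getD 0 0 = 0 := by
  cases r with
  | nil => rfl
  | cons a t => simp at h; simp [h.1]

lemma all_zero_head (r : List Int) (h : r.all (fun x => x == 0) = true) : r[0]?.getD 0 = 0 := by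
  cases r with
  | nil => rfl
  | cons a t => simp at h; simp [h.1]

lemma foldl_pp_step_length (rng : List Int) : ∀ (ds : List (List Int)),
    (rng.foldl pp_step ds).length = ds.length := by
  induction rng with
  | nil => intro ds; rfl
  | cons i rng ih =>
    intro ds
    rw [List.foldl_cons, ih]
    simp [pp_step, PySem.List.length_pySetD]

lemma chain_last : ∀ (f : Nat) (r : List Int), r.length < f →
    ((r :: chainF f r).getLast (by simp)).getD 0 0 = 0 := by
  intro f
  induction f with
  | zero => intro r hr; omega
  | succ f ih =>
    intro r hr
    rw [chainF]
    by_cases hz : only_zero r = true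
    · simp only [hz, if_true]
      rw [List.getLast_singleton]
      exact all_zero_getD r (by rwa [only_zero_iff] at hz)
    · simp only [Bool.not_eq_true] at hz
      rw [hz]
      simp only [Bool.false_eq_true, if_false]
      have hne : r ≠ [] := by
        rintro rfl; rw [only_zero_iff] at hz; simp at hz
      have hlen : (gen_diff_row r).length < f := by
        rw [gen_diff_row_eq, length_diffB]
        have : 0 < r.length := List.length_pos_iff.mpr hne
        omega
      have := ih (gen_diff_row r) hlen
      rwa [List.getLast_cons (by simp)]

lemma chain_sum : ∀ (f : Nat) (r : List Int), r.length < f →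
    ((r :: chainF f r).reverse).foldl step' 0 = pvR r := by
  intro f
  induction f with
  | zero => intro r hr; omega
  | succ f ih =>
    intro r hr
    rw [chainF, pvR]
    by_cases hz : only_zero r = true
    · rw [only_zero_iff] at hz
      have hoz : only_zero r = true := by rw [only_zero_iff]; exact hz
      simp only [hoz, hz, if_true]
      simp [step', all_zero_head r hz]
    · simp only [Bool.not_eq_true] at hz
      rw [hz]
      simp only [Bool.false_eq_true, if_false]
      have hall : r.all (fun x => x == 0) = false := by rwa [only_zero_iff] at hz
      rw [hall]
      simp only [Bool.false_eq_true, if_false]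
      have hne : r ≠ [] := by
        rintro rfl; simp at hall
      have hlen : (gen_diff_row r).length < f := by
        rw [gen_diff_row_eq, length_diffB]
        have : 0 < r.length := List.length_pos_iff.mpr hne
        omega
      have hrev : (r :: gen_diff_row r :: chainF f (gen_diff_row r)).reverse
          = (gen_diff_row r :: chainF f (gen_diff_row r)).reverse ++ [r] := by
        simp
      rw [hrev, List.foldl_append, ih _ hlen]
      simp [step', gen_diff_row_eq]

lemma A_eq_pvR (h : List Int) : predict_previous h = pvR h := by
  rw [predict_previous]
  have hgd : generate_differences h = h :: chainF (h.length + 1) h := by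
    rw [generate_differences, gd_loop_eq _ [h] (by simp)]
    simp
  rw [hgd]
  set c := chainF (h.length + 1) h with hc
  by_cases hcnil : c = []
  · -- all-zero history: the loop range is empty
    rw [hcnil]
    simp only [List.reverse_cons, List.reverse_nil, List.nil_append, List.length_cons,
      List.length_nil]
    rw [PySem.List.pyRange_one_eq_nil (by norm_num), List.foldl_nil]
    rw [PySem.List.pyGetD_neg_one _ [] (by simp), List.getLast_singleton,
      PySem.List.pyGetD_zero]
    -- c = [] with positive fuel means only_zero h
    have hz : h.all (fun x => x == 0) = true := by
      by_contra hz
      simp only [Bool.not_eq_true] at hz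
      rw [hc, chainF, only_zero_iff, hz] at hcnil
      simp at hcnil
    rw [pvR, hz]
    simp [all_zero_head h hz]
  · -- main case: apply the loop invariant at k = 1
    have hlenrev : ((h :: c).reverse).length = c.length + 1 := by simp
    have hc1 : 1 ≤ c.length := by
      have := List.length_pos_iff.mpr hcnil; omega
    have inv := loop_inv ((h :: c).reverse) (((h :: c).reverse).length - 1 - 1) 1
      ((h :: c).reverse) (((h :: c).reverse.getD 1 []).getD 0 0)
      rfl rfl (by simp; omega) rfl (fun j _ _ => rfl)
    simp only [Nat.cast_one] at inv
    have hfne : (List.foldl pp_step ((h :: c).reverse)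
        (PySem.List.pyRange 1 ((((h :: c).reverse).length : Int) - 1))) ≠ [] := by
      intro e
      have := foldl_pp_step_length
        (PySem.List.pyRange 1 ((((h :: c).reverse).length : Int) - 1)) ((h :: c).reverse)
      rw [e] at this
      simp at this
    rw [PySem.List.pyGetD_neg_one _ [] hfne, PySem.List.pyGetD_zero]
    have hcv : (List.foldl pp_step ((h :: c).reverse)
          (PySem.List.pyRange 1 ((((h :: c).reverse).length : Int) - 1))).getLast hfne
        = (List.foldl pp_step ((h :: c).reverse)
          (PySem.List.pyRange 1 ((((h :: c).reverse).length : Int) - 1))).getLast?.getD [] := by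
      rw [List.getLast?_eq_some_getLast hfne, Option.getD_some]
    rw [hcv, inv]
    -- turn the partial fold into the full fold over the reverse
    have hzero : (((h :: c).reverse).getD 0 []).getD 0 0 = 0 := by
      have hlt : 0 < (h :: c).reverse.length := by simp
      have hrow : ((h :: c).reverse).getD 0 [] = (h :: c)[(h :: c).length - 1 - 0] := by
        rw [List.getD_eq_getElem?_getD, List.getElem?_eq_getElem hlt, Option.getD_some,
          List.getElem_reverse]
        rfl
      rw [hrow]
      have hlast := chain_last (h.length + 1) h (by omega)
      rw [← hc, List.getLast_eq_getElem] at hlast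
      simpa using hlast
    have hfull : ((h :: c).reverse).foldl step' 0
        = ((h :: c).reverse.drop 2).foldl step' (((h :: c).reverse.getD 1 []).getD 0 0) := by
      have h2 : 2 ≤ ((h :: c).reverse).length := by simp; omega
      obtain ⟨a, b, rest, he⟩ : ∃ a b rest, (h :: c).reverse = a :: b :: rest := by
        obtain ⟨a, l1, he1⟩ := List.exists_cons_of_ne_nil (l := (h :: c).reverse) (by simp)
        have hl1 : l1 ≠ [] := by
          intro e
          rw [e] at he1
          have hlen1 := congrArg List.length he1
          simp only [List.length_reverse, List.length_cons, List.length_nil] at hlen1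
          omega
        obtain ⟨b, rest, he2⟩ := List.exists_cons_of_ne_nil hl1
        exact ⟨a, b, rest, by rw [he1, he2]⟩
      rw [he] at hzero ⊢
      simp only [List.foldl_cons, List.drop_succ_cons, List.drop_zero]
      simp only [List.getD_cons_zero] at hzero
      have hz0 : a[0]?.getD 0 = 0 := by rw [← List.getD_eq_getElem?_getD]; exact hzero
      simp [step', hz0]
    rw [← hfull, chain_sum (h.length + 1) h (by omega)]

def Fsum (h : List Int) : Int :=
  ∑ i ∈ Finset.range h.length, (-1:Int)^i * (h.length.choose (i+1) : Int) * h.getD i 0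

lemma F_zero (h : List Int) (hz : h.all (fun x => x == 0) = true) : Fsum h = 0 := by
  apply Finset.sum_eq_zero
  intro i hi
  rw [Finset.mem_range] at hi
  have : h.getD i 0 = 0 := by
    rw [List.getD_eq_getElem?_getD, List.getElem?_eq_getElem hi]
    simp only [Option.getD_some]
    simpa using (List.all_eq_true.mp hz _ (List.getElem_mem hi))
  rw [this]
  ring

lemma F_step (h : List Int) (hne : h ≠ []) : Fsum h = h.getD 0 0 - Fsum (diffB h) := by
  obtain ⟨a, t, rfl⟩ := List.exists_cons_of_ne_nil hne
  rcases t with _ | ⟨b, t'⟩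
  · simp [Fsum, diffB]
  set t := b :: t' with ht
  set n := t.length with hn
  have hdl : (diffB (a :: t)).length = n := by
    rw [length_diffB]
    simp
    rw [hn]
  rw [Fsum, Fsum, hdl]
  simp only [List.length_cons, ← hn]
  -- peel the i = 0 term of the left sum
  rw [Finset.sum_range_succ' (fun i => (-1:Int)^i * ((n+1).choose (i+1) : Int) * (a :: t).getD i 0) n]
  simp only [List.getD_cons_succ, List.getD_cons_zero, pow_zero]
  -- rewrite the right-hand sum's summands via getD_diffB
  have hds : ∀ i ∈ Finset.range n, (-1:Int)^i * (n.choose (i+1) : Int) * (diffB (a :: t)).getD i 0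
      = (-1:Int)^i * (n.choose (i+1) : Int) * t.getD i 0
        - (-1:Int)^i * (n.choose (i+1) : Int) * (a :: t).getD i 0 := by
    intro i hi
    rw [Finset.mem_range] at hi
    rw [getD_diffB (a :: t) i (by simp; omega), List.getD_cons_succ]
    ring
  rw [Finset.sum_congr rfl hds, Finset.sum_sub_distrib]
  -- peel the i = 0 term of the ∑ (a :: t).getD i 0 sum  (n = t'.length + 1)
  have hn' : n = t'.length + 1 := by rw [hn, ht]; simp
  rw [hn']
  rw [Finset.sum_range_succ' (fun i => (-1:Int)^i * ((t'.length+1).choose (i+1) : Int) * (a :: t).getD i 0) t'.length]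
  simp only [List.getD_cons_succ, List.getD_cons_zero, pow_zero]
  -- extend the peeled sum over range t'.length back to range (t'.length + 1): the extra term is 0
  have hext : ∑ i ∈ Finset.range t'.length,
        (-1:Int)^(i+1) * ((t'.length+1).choose (i+1+1) : Int) * t.getD i 0
      = ∑ i ∈ Finset.range (t'.length+1),
        (-1:Int)^(i+1) * ((t'.length+1).choose (i+1+1) : Int) * t.getD i 0 := by
    rw [Finset.sum_range_succ]
    have : (t'.length+1).choose (t'.length+1+1) = 0 := Nat.choose_eq_zero_of_lt (by omega)
    rw [this]
    push_cast
    ring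
  rw [hext]
  -- combine with Pascal's rule termwise, then close by ring
  have hterm : ∀ i ∈ Finset.range (t'.length+1),
      (-1:Int)^(i+1) * (((t'.length+1)+1).choose (i+1+1) : Int) * t.getD i 0
      = -((-1:Int)^i * ((t'.length+1).choose (i+1) : Int) * t.getD i 0)
        + (-1:Int)^(i+1) * ((t'.length+1).choose (i+1+1) : Int) * t.getD i 0 := by
    intro i _
    rw [Nat.choose_succ_succ (t'.length+1) (i+1)]
    push_cast
    ring
  rw [Finset.sum_congr rfl hterm, Finset.sum_add_distrib]
  norm_num [Nat.choose_one_right]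
  ring

lemma pvR_eq_F : ∀ (N : Nat) (h : List Int), h.length ≤ N → pvR h = Fsum h := by
  intro N
  induction N with
  | zero =>
    intro h hl
    have : h = [] := List.eq_nil_of_length_eq_zero (by omega)
    subst this
    rw [pvR]
    simp [Fsum]
  | succ N ih =>
    intro h hl
    rw [pvR]
    by_cases hz : h.all (fun x => x == 0) = true
    · rw [hz]
      simp [F_zero h hz]
    · simp only [Bool.not_eq_true] at hz
      rw [hz]
      simp only [Bool.false_eq_true, if_false]
      have hne : h ≠ [] := by rintro rfl; simp at hz
      have h0 : 0 < h.length := List.length_pos_iff.mpr hne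
      rw [F_step h hne, ih (diffB h) (by rw [length_diffB]; omega)]

lemma alt_loop (nn : Nat) : ∀ (t : List Int) (k : Nat) (T : Int),
    ((PySem.List.enumerate t (k : Int)).foldl
      (fun (st : Int × Int) iv =>
        (st.1 + (if PySem.Int.mod iv.1 2 == 0 then st.2 else -st.2) * iv.2,
         PySem.Int.floordiv (st.2 * ((nn : Int) - iv.1 - 1)) (iv.1 + 2)))
      (T, (nn.choose (k+1) : Int))).1
    = T + ∑ i ∈ Finset.range t.length, (-1:Int)^(k+i) * (nn.choose (k+i+1) : Int) * t.getD i 0 := by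
  intro t
  induction t with
  | nil => intro k T; simp [PySem.List.enumerate_nil]
  | cons x xs ih =>
    intro k T
    rw [PySem.List.enumerate_cons, List.foldl_cons]
    -- the sign
    have hsign : (if PySem.Int.mod (k : Int) 2 == 0 then (nn.choose (k+1) : Int)
        else -(nn.choose (k+1) : Int)) = (-1:Int)^k * (nn.choose (k+1) : Int) := by
      have : PySem.Int.mod (k : Int) 2 = ((k % 2 : Nat) : Int) := by
        exact_mod_cast PySem.Int.mod_natCast k 2
      rw [this]
      rcases Nat.even_or_odd k with he | ho
      · have hek := he
        rw [Nat.even_iff] at he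
        rw [Even.neg_one_pow hek]
        simp [he]
      · have hok := ho
        rw [Nat.odd_iff] at ho
        rw [Odd.neg_one_pow hok]
        simp [ho]
    -- the updated coefficient
    have hcoef : PySem.Int.floordiv ((nn.choose (k+1) : Int) * ((nn : Int) - (k : Int) - 1)) ((k : Int) + 2)
        = (nn.choose (k+2) : Int) := by
      by_cases hk : k + 1 ≤ nn
      · have e1 : (nn : Int) - (k : Int) - 1 = ((nn - (k+1) : Nat) : Int) := by
          push_cast [hk]
          omega
        rw [e1]
        have e2 : (nn.choose (k+1) : Int) * ((nn - (k+1) : Nat) : Int)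
            = (nn.choose (k+2) : Int) * ((k : Int) + 2) := by
          have h2 : ((k:Int) + 2) = ((k+2 : Nat) : Int) := by push_cast; ring
          rw [h2]
          exact_mod_cast (Nat.choose_succ_right_eq nn (k+1)).symm
        rw [e2, PySem.Int.floordiv_eq_ediv_of_pos (by omega)]
        exact Int.mul_ediv_cancel _ (by omega)
      · have z1 : nn.choose (k+1) = 0 := Nat.choose_eq_zero_of_lt (by omega)
        have z2 : nn.choose (k+2) = 0 := Nat.choose_eq_zero_of_lt (by omega)
        rw [z1, z2]
        simp [PySem.Int.floordiv_eq_ediv_of_pos (by omega : (0:Int) < (k:Int) + 2)]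
    rw [hsign, hcoef]
    have ek : (k : Int) + 1 = ((k+1 : Nat) : Int) := by omega
    rw [ek, ih (k+1) (T + (-1:Int)^k * (nn.choose (k+1) : Int) * x)]
    -- reassemble the sum
    rw [List.length_cons, Finset.sum_range_succ'
      (fun i => (-1:Int)^(k+i) * (nn.choose (k+i+1) : Int) * (x :: xs).getD i 0) xs.length]
    simp only [List.getD_cons_succ, List.getD_cons_zero, Nat.add_zero]
    have hre : ∀ i ∈ Finset.range xs.length,
        (-1:Int)^(k+1+i) * (nn.choose (k+1+i+1) : Int) * xs.getD i 0
        = (-1:Int)^(k+(i+1)) * (nn.choose (k+(i+1)+1) : Int) * xs.getD i 0 := by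
      intro i _
      have e : k+1+i = k+(i+1) := by omega
      rw [e]
    rw [Finset.sum_congr rfl hre]
    ring

lemma altB_eq_F (h : List Int) : predict_previous_alt h = Fsum h := by
  have key := alt_loop h.length h 0 0
  simp only [Nat.cast_zero, Nat.choose_one_right, zero_add] at key
  simp only [predict_previous_alt]
  rw [key, Fsum]

lemma main_eq (h : List Int) : predict_previous h = predict_previous_alt h := by
  rw [A_eq_pvR h, pvR_eq_F h.length h le_rfl, altB_eq_F h]

-- ===== VERDICT (by name: the statement is the Claim_ definition above) =====
theorem predict_previous_spec : Claim_equal_predict_previous := by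
  intro history _ _
  unfold Spec_predict_previous
  exact main_eq history
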